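-- pv_equiv track=rewrite | github.com/Mvk122/Leetcode-Solutions | triplesum.py | triplets_fast
-- ===== SOURCE A (Python) =====
-- def smallest(arr, target):
--     start = 0
--     end = len(arr) -1
--     if target > arr[end]:
--         return end
--
--     ans = -1
--     while start <= end:
--         mid = (start + end) // 2
--         if arr[mid] > target:
--             end = mid -1
--         else:
--             ans = mid
--             start = mid + 1
--     return ans
--
-- def triplets_fast(a,b,c):
--     b = list(set(b))
--     b.sort()
--     a = list(set(a))
--     c = list(set(c))
--     a.sort()
--     c.sort()
--     ans = 0
--     for anchor in reversed(b):
--         small_a = smallest(a, anchor)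
--         if small_a == -1:
--             continue
--         small_c = smallest(c, anchor)
--         if small_c == -1:
--             continue
--         ans += (small_c+1) * (small_a+1)
--     return ans
-- ===== SOURCE B (Python) =====
-- def triplets_fast(a, b, c):
--     # Dedup + sort, then one monotone two-pointer sweep over the anchors of b.
--     A = sorted(set(a))
--     B = sorted(set(b))
--     C = sorted(set(c))
--     i = j = 0
--     ans = 0
--     for x in B:
--         while i < len(A) and A[i] <= x:
--             i += 1
--         while j < len(C) and C[j] <= x:
--             j += 1
--         ans += i * j
--     return ans
-- ===== Notes on version B (the rewrite author's own statement) =====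
-- stated objective: faster
-- what changed: Replaces the per-anchor manual binary searches (over reversed b) with a single forward-only two-pointer merge sweep over the ascending sorted anchors, whose monotone pointer positions into sorted a and c equal the counts.
-- crash fix: When b is nonempty and a is empty, or c is empty while some anchor of b is >= min(a), A raises IndexError (arr[-1] on an empty list inside smallest); B returns the correct count, which is 0 there. — e.g. on triplets_fast([], [0], []): A raises IndexError, B returns 0
import Mathlib
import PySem

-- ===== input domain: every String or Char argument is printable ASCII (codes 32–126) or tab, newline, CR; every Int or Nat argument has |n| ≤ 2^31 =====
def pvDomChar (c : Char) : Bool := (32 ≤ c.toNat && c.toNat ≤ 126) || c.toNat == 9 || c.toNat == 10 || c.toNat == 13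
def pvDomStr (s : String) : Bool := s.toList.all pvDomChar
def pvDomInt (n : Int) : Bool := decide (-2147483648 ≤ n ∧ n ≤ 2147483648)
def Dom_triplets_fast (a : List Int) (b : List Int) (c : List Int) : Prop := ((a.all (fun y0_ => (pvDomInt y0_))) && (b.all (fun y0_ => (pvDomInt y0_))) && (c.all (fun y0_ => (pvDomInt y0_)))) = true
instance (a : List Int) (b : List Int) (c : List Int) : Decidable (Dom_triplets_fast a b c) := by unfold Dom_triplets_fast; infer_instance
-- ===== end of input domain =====

-- B replaces A's per-anchor binary searches with one two-pointer merge sweep; same asymptotics (sorting dominates), simpler inner loop.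

-- ===== PORT A =====
-- the while-loop of `smallest`; arr[mid] is in range on every reachable call
-- (0 ≤ start ≤ mid ≤ end_ < arr.length), so pyGetD with default 0 is exact there
def pvBsearch (arr : List Int) (target : Int) (start end_ ans : Int) : Int :=
  if _h : start ≤ end_ then
    let mid := PySem.Int.floordiv (start + end_) 2
    if PySem.List.pyGetD arr mid 0 > target then
      pvBsearch arr target start (mid - 1) ans
    else
      pvBsearch arr target (mid + 1) end_ mid
  else ans
termination_by (end_ + 1 - start).toNat
decreasing_by
  · obtain ⟨h1, h2⟩ := PySem.Int.floordiv_two_mid_bounds _h; omega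
  · obtain ⟨h1, h2⟩ := PySem.Int.floordiv_two_mid_bounds _h; omega

-- `smallest`; none = IndexError from arr[end] on an empty arr
def pvSmallest (arr : List Int) (target : Int) : Option Int :=
  -- start = 0 and end = len(arr) - 1 inlined
  match PySem.List.pyGet? arr ((arr.length : Int) - 1) with
  | none => none
  | some last =>
    if target > last then some ((arr.length : Int) - 1)
    else some (pvBsearch arr target 0 ((arr.length : Int) - 1) (-1))

-- one iteration of A's `for anchor in reversed(b)` loop; the Option state propagates an IndexError
def pvStepA (A C : List Int) (s : Option Int) (anchor : Int) : Option Int :=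
  s.bind fun ans =>
    (pvSmallest A anchor).bind fun sa =>
      if sa = -1 then some ans
      else (pvSmallest C anchor).bind fun sc =>
        if sc = -1 then some ans
        else some (ans + (sc + 1) * (sa + 1))

def triplets_fast (a : List Int) (b : List Int) (c : List Int) : Int :=
  let B := PySem.List.sorted (PySem.Set.ofList b) (fun x => x) false
  let A := PySem.List.sorted (PySem.Set.ofList a) (fun x => x) false
  let C := PySem.List.sorted (PySem.Set.ofList c) (fun x => x) false
  -- .getD 0 only discharges the IndexError state, which Pre_ excludes
  (B.reverse.foldl (pvStepA A C) (some 0)).getD 0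

-- ===== PORT B =====
-- `while i < len(A) and A[i] <= x: i += 1`, with the pointer kept as (count, remaining suffix)
def pvAdv (x : Int) : Nat → List Int → Nat × List Int
  | i, [] => (i, [])
  | i, y :: t => if y ≤ x then pvAdv x (i + 1) t else (i, y :: t)

-- the `for x in B` sweep with both pointers and the accumulator
def pvSweep : List Int → Nat → List Int → Nat → List Int → Int → Int
  | [], _, _, _, _, ans => ans
  | x :: rest, i, ra, j, rc, ans =>
    let p := pvAdv x i ra
    let q := pvAdv x j rc
    pvSweep rest p.1 p.2 q.1 q.2 (ans + (p.1 : Int) * (q.1 : Int))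

def triplets_fast_alt (a : List Int) (b : List Int) (c : List Int) : Int :=
  let A := PySem.List.sorted (PySem.Set.ofList a) (fun x => x) false
  let B := PySem.List.sorted (PySem.Set.ofList b) (fun x => x) false
  let C := PySem.List.sorted (PySem.Set.ofList c) (fun x => x) false
  pvSweep B 0 A 0 C 0

-- ===== PRECONDITION & SPEC =====
-- Pre_ excludes exactly the inputs on which A raises IndexError (arr[-1] inside `smallest`
-- on an empty deduped a, or on an empty deduped c after some anchor passed the a-check).
def Pre_triplets_fast (a : List Int) (b : List Int) (c : List Int) : Prop :=
  b = [] ∨ (a ≠ [] ∧ (c ≠ [] ∨ ∀ x ∈ b, ∀ y ∈ a, x < y))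
instance (a : List Int) (b : List Int) (c : List Int) : Decidable (Pre_triplets_fast a b c) := by
  unfold Pre_triplets_fast; infer_instance

def pvWitness_triplets_fast : List Int × List Int × List Int := ([1, 2, 2], [2, 3], [0, 3])

-- When b is nonempty and a is empty, or c is empty while some anchor of b is ≥ min(a),
-- A raises IndexError; B returns the correct count, which is 0 there (theorem triplets_fast_raises).
def Raises_triplets_fast (a : List Int) (b : List Int) (c : List Int) : Prop :=
  b ≠ [] ∧ (a = [] ∨ (c = [] ∧ ∃ x ∈ b, ∃ y ∈ a, y ≤ x))
instance (a : List Int) (b : List Int) (c : List Int) : Decidable (Raises_triplets_fast a b c) := by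
  unfold Raises_triplets_fast; infer_instance

def pvRaiseWitness_triplets_fast : List Int × List Int × List Int := ([], [0], [])
def pvRaiseWitnessOut_triplets_fast : Int := 0

def Spec_triplets_fast (a : List Int) (b : List Int) (c : List Int) (out : Int) : Prop := out = triplets_fast_alt a b c
instance (a : List Int) (b : List Int) (c : List Int) (out : Int) : Decidable (Spec_triplets_fast a b c out) := by unfold Spec_triplets_fast; infer_instance

-- ===== CLAIM (what is proved, stated in full; the proofs are below) =====
def Claim_equal_triplets_fast : Prop := ∀ (a : List Int) (b : List Int) (c : List Int), Dom_triplets_fast a b c → Pre_triplets_fast a b c → Spec_triplets_fast a b c (triplets_fast a b c)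

def Claim_raises_triplets_fast : Prop := (∀ (a : List Int) (b : List Int) (c : List Int), Dom_triplets_fast a b c → Raises_triplets_fast a b c → ¬ Pre_triplets_fast a b c) ∧ (Dom_triplets_fast (pvRaiseWitness_triplets_fast.1) (pvRaiseWitness_triplets_fast.2.1) (pvRaiseWitness_triplets_fast.2.2) ∧ Raises_triplets_fast (pvRaiseWitness_triplets_fast.1) (pvRaiseWitness_triplets_fast.2.1) (pvRaiseWitness_triplets_fast.2.2) ∧ triplets_fast_alt (pvRaiseWitness_triplets_fast.1) (pvRaiseWitness_triplets_fast.2.1) (pvRaiseWitness_triplets_fast.2.2) = pvRaiseWitnessOut_triplets_fast)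

-- ===== LEMMAS AND PROOFS =====

-- number of elements ≤ t
def pvCnt (l : List Int) (t : Int) : Nat := l.countP (fun y => decide (y ≤ t))

lemma pvCnt_le_length (l : List Int) (t : Int) : pvCnt l t ≤ l.length :=
  List.countP_le_length

lemma pvCnt_eq_zero (l : List Int) (t : Int) (h : ∀ y ∈ l, t < y) : pvCnt l t = 0 := by
  unfold pvCnt
  rw [List.countP_eq_zero]
  intro y hy
  simpa using not_le.mpr (h y hy)

-- in an ascending list, position k holds an element ≤ t exactly when k < pvCnt
lemma pvCnt_iff (l : List Int) (t : Int) (hs : l.Pairwise (· ≤ ·)) :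
    ∀ k : Nat, (hk : k < l.length) → (l[k] ≤ t ↔ (k : Int) < (pvCnt l t : Int)) := by
  induction l with
  | nil => intro k hk; simp at hk
  | cons z tl ih =>
    intro k hk
    have hz : ∀ w ∈ tl, z ≤ w := fun w hw => List.rel_of_pairwise_cons hs hw
    have htl : tl.Pairwise (· ≤ ·) := hs.of_cons
    by_cases hzt : z ≤ t
    · have hcnt : pvCnt (z :: tl) t = pvCnt tl t + 1 := by
        unfold pvCnt; simp [hzt]
      cases k with
      | zero =>
        simp only [List.getElem_cons_zero, hcnt]
        constructor
        · intro _; push_cast; omega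
        · intro _; exact hzt
      | succ k =>
        have hk' : k < tl.length := by simpa using hk
        have := ih htl k hk'
        simp only [List.getElem_cons_succ, hcnt]
        rw [this]
        push_cast
        omega
    · have hall : ∀ w ∈ tl, t < w := by
        intro w hw
        exact lt_of_lt_of_le (not_le.mp hzt) (hz w hw)
      have h0 : pvCnt tl t = 0 := pvCnt_eq_zero tl t hall
      have hcnt : pvCnt (z :: tl) t = 0 := by
        unfold pvCnt at h0 ⊢; simp [hzt, h0]
      cases k with
      | zero =>
        simp only [List.getElem_cons_zero, hcnt]
        constructor
        · intro hle; exact absurd hle hzt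
        · intro hlt; simp at hlt
      | succ k =>
        have hk' : k < tl.length := by simpa using hk
        have hmem : tl[k] ∈ tl := List.getElem_mem hk'
        simp only [List.getElem_cons_succ, hcnt]
        constructor
        · intro hle; exact absurd hle (not_le.mpr (hall _ hmem))
        · intro hlt; omega

-- A's binary-search loop computes pvCnt - 1 under the invariant ans = start - 1
lemma pvBsearch_inv (arr : List Int) (t : Int)
    (H : ∀ k : Nat, (hk : k < arr.length) → (arr[k] ≤ t ↔ (k : Int) < (pvCnt arr t : Int))) :
    ∀ (n : Nat) (start endI : Int), (endI + 1 - start).toNat ≤ n →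
      0 ≤ start → endI ≤ (arr.length : Int) - 1 →
      start ≤ (pvCnt arr t : Int) → (pvCnt arr t : Int) ≤ endI + 1 →
      pvBsearch arr t start endI (start - 1) = (pvCnt arr t : Int) - 1 := by
  intro n
  induction n with
  | zero =>
    intro start endI hm h0 hlen hlo hhi
    have hnle : ¬ start ≤ endI := by omega
    rw [pvBsearch, dif_neg hnle]
    omega
  | succ n ih =>
    intro start endI hm h0 hlen hlo hhi
    by_cases hse : start ≤ endI
    · rw [pvBsearch, dif_pos hse]
      obtain ⟨hm1, hm2⟩ := PySem.Int.floordiv_two_mid_bounds hse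
      set mid := PySem.Int.floordiv (start + endI) 2 with hmid
      have hmr : 0 ≤ mid ∧ mid < (arr.length : Int) := by omega
      have hget : PySem.List.pyGetD arr mid 0 = arr[mid.toNat] :=
        PySem.List.pyGetD_eq_getElem arr 0 hmr.1 hmr.2
      have hkk : mid.toNat < arr.length := by omega
      have hiff := H mid.toNat hkk
      have hcast : ((mid.toNat : Int)) = mid := by omega
      rw [hcast] at hiff
      by_cases hgt : PySem.List.pyGetD arr mid 0 > t
      · simp only [hgt, if_true]
        have hc : (pvCnt arr t : Int) ≤ mid := by
          by_contra hc
          have := hiff.mpr (by omega)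
          rw [hget] at hgt; omega
        have := ih start (mid - 1) (by omega) h0 (by omega) hlo (by omega)
        exact this
      · simp only [hgt, if_false]
        have hle : arr[mid.toNat] ≤ t := by rw [hget] at hgt; omega
        have hc : mid < (pvCnt arr t : Int) := hiff.mp hle
        have := ih (mid + 1) endI (by omega) (by omega) hlen (by omega) hhi
        simpa using this
    · rw [pvBsearch, dif_neg hse]
      omega

-- `smallest` on a nonempty ascending list returns pvCnt - 1
lemma pvSmallest_eq (arr : List Int) (t : Int) (hne : arr ≠ [])
    (hs : arr.Pairwise (· ≤ ·)) :
    pvSmallest arr t = some ((pvCnt arr t : Int) - 1) := by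
  unfold pvSmallest
  have hlen : 0 < arr.length := List.length_pos_iff.mpr hne
  have hidx : ((arr.length : Int) - 1) = ((arr.length - 1 : Nat) : Int) := by omega
  have hget : PySem.List.pyGet? arr ((arr.length : Int) - 1) = some arr[arr.length - 1] := by
    rw [hidx, PySem.List.pyGet?_natCast]
    exact List.getElem?_eq_getElem (by omega)
  rw [hget]
  simp only []
  by_cases hgt : t > arr[arr.length - 1]
  · -- every element is ≤ the last one, hence ≤ t; count is the full length
    have hcnt : pvCnt arr t = arr.length := by
      unfold pvCnt
      rw [List.countP_eq_length]
      intro y hy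
      obtain ⟨k, hk, hky⟩ := List.getElem_of_mem hy
      have hmono : y ≤ arr[arr.length - 1] := by
        rcases Nat.lt_or_ge k (arr.length - 1) with h | h
        · subst hky
          exact List.pairwise_iff_getElem.mp hs k (arr.length - 1) hk (by omega) h
        · have : k = arr.length - 1 := by omega
          subst this; omega
      simp [le_of_lt (lt_of_le_of_lt hmono hgt)]
    rw [if_pos hgt, hcnt]
  · rw [if_neg hgt]
    congr 1
    have := pvBsearch_inv arr t (pvCnt_iff arr t hs) (arr.length) 0 ((arr.length : Int) - 1)
      (by omega) (by omega) (by omega) (by positivity)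
      (by have := pvCnt_le_length arr t; omega)
    simpa using this

-- A's loop sums pvCnt C x * pvCnt A x over the anchors, provided no IndexError occurs
lemma pvFoldA_eq (A C : List Int) (hA : A ≠ []) (hsA : A.Pairwise (· ≤ ·))
    (hsC : C.Pairwise (· ≤ ·)) :
    ∀ (xs : List Int) (ans : Int),
      (∀ x ∈ xs, C ≠ [] ∨ pvCnt A x = 0) →
      xs.foldl (pvStepA A C) (some ans)
        = some (ans + (xs.map (fun x => (pvCnt C x : Int) * (pvCnt A x : Int))).sum) := by
  intro xs
  induction xs with
  | nil => intro ans _; simp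
  | cons x rest ih =>
    intro ans hc
    have hx := hc x (by simp)
    simp only [List.foldl_cons]
    have hstep : pvStepA A C (some ans) x
        = some (ans + (pvCnt C x : Int) * (pvCnt A x : Int)) := by
      unfold pvStepA
      rw [pvSmallest_eq A x hA hsA]
      simp only [Option.bind_some]
      by_cases hA0 : pvCnt A x = 0
      · simp [hA0]
      · have hC : C ≠ [] := by rcases hx with h | h; exact h; exact absurd h hA0
        have hsa : ¬ ((pvCnt A x : Int) - 1 = -1) := by omega
        rw [if_neg hsa, pvSmallest_eq C x hC hsC]
        simp only [Option.bind_some]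
        by_cases hC0 : pvCnt C x = 0
        · simp [hC0]
        · have hsc : ¬ ((pvCnt C x : Int) - 1 = -1) := by omega
          rw [if_neg hsc]
          congr 1
          ring
    rw [hstep, ih _ (fun y hy => hc y (by simp [hy]))]
    congr 1
    simp only [List.map_cons, List.sum_cons]
    ring

-- pvAdv is takeWhile/dropWhile on the remaining suffix
lemma pvAdv_eq (x : Int) : ∀ (r : List Int) (i : Nat),
    pvAdv x i r = (i + (r.takeWhile (fun y => decide (y ≤ x))).length,
                   r.dropWhile (fun y => decide (y ≤ x))) := by
  intro r
  induction r with
  | nil => intro i; simp [pvAdv]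
  | cons y t ih =>
    intro i
    by_cases h : y ≤ x
    · simp [pvAdv, h, List.dropWhile_cons, ih]
      omega
    · simp [pvAdv, h]

-- on an ascending list, the takeWhile length is the count of elements ≤ x
lemma pvTakeWhile_len (x : Int) : ∀ (r : List Int), r.Pairwise (· ≤ ·) →
    (r.takeWhile (fun y => decide (y ≤ x))).length = pvCnt r x := by
  intro r
  induction r with
  | nil => intro _; simp [pvCnt]
  | cons z t ih =>
    intro hs
    by_cases h : z ≤ x
    · simp only [List.takeWhile_cons, h, decide_true]
      unfold pvCnt
      simp [h]
      have := ih hs.of_cons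
      unfold pvCnt at this
      omega
    · have hall : ∀ w ∈ t, x < w := fun w hw =>
        lt_of_lt_of_le (not_le.mp h) (List.rel_of_pairwise_cons hs hw)
      have h0 := pvCnt_eq_zero t x hall
      simp only [List.takeWhile_cons, h, decide_false]
      unfold pvCnt
      simp [h]
      unfold pvCnt at h0
      simp [h0]

lemma pvCnt_append (l₁ l₂ : List Int) (t : Int) :
    pvCnt (l₁ ++ l₂) t = pvCnt l₁ t + pvCnt l₂ t := by
  unfold pvCnt; exact List.countP_append ..

-- the two-pointer sweep invariant: each pointer equals the count of consumed elements
lemma pvSweep_inv (A0 C0 : List Int) (hsA : A0.Pairwise (· ≤ ·)) (hsC : C0.Pairwise (· ≤ ·)) :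
    ∀ (xs : List Int), xs.Pairwise (· ≤ ·) →
    ∀ (da dc ra rc : List Int) (ans : Int),
      A0 = da ++ ra → C0 = dc ++ rc →
      (∀ x ∈ xs, ∀ y ∈ da, y ≤ x) → (∀ x ∈ xs, ∀ y ∈ dc, y ≤ x) →
      pvSweep xs da.length ra dc.length rc ans
        = ans + (xs.map (fun x => (pvCnt A0 x : Int) * (pvCnt C0 x : Int))).sum := by
  intro xs
  induction xs with
  | nil => intro _ da dc ra rc ans _ _ _ _; simp [pvSweep]
  | cons x rest ih =>
    intro hxs da dc ra rc ans hA hC hda hdc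
    have hra : ra.Pairwise (· ≤ ·) :=
      List.Pairwise.sublist (List.sublist_append_right da ra) (hA ▸ hsA)
    have hrc : rc.Pairwise (· ≤ ·) :=
      List.Pairwise.sublist (List.sublist_append_right dc rc) (hC ▸ hsC)
    have hxrest : ∀ x' ∈ rest, x ≤ x' := fun x' hx' => List.rel_of_pairwise_cons hxs hx'
    have hcntA : pvCnt A0 x = da.length + (ra.takeWhile (fun y => decide (y ≤ x))).length := by
      rw [hA, pvCnt_append, pvTakeWhile_len x ra hra]
      congr 1
      unfold pvCnt
      rw [List.countP_eq_length]
      intro y hy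
      exact decide_eq_true (hda x (by simp) y hy)
    have hcntC : pvCnt C0 x = dc.length + (rc.takeWhile (fun y => decide (y ≤ x))).length := by
      rw [hC, pvCnt_append, pvTakeWhile_len x rc hrc]
      congr 1
      unfold pvCnt
      rw [List.countP_eq_length]
      intro y hy
      exact decide_eq_true (hdc x (by simp) y hy)
    rw [pvSweep, pvAdv_eq, pvAdv_eq]
    have hlenA : da.length + (ra.takeWhile (fun y => decide (y ≤ x))).length
        = (da ++ ra.takeWhile (fun y => decide (y ≤ x))).length := by
      simp
    have hlenC : dc.length + (rc.takeWhile (fun y => decide (y ≤ x))).length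
        = (dc ++ rc.takeWhile (fun y => decide (y ≤ x))).length := by
      simp
    simp only [hlenA, hlenC]
    rw [ih hxs.of_cons (da ++ ra.takeWhile (fun y => decide (y ≤ x)))
          (dc ++ rc.takeWhile (fun y => decide (y ≤ x)))
          (ra.dropWhile (fun y => decide (y ≤ x))) (rc.dropWhile (fun y => decide (y ≤ x))) _
          (by rw [List.append_assoc, List.takeWhile_append_dropWhile]; exact hA)
          (by rw [List.append_assoc, List.takeWhile_append_dropWhile]; exact hC)
          ?_ ?_]
    · simp only [List.map_cons, List.sum_cons, List.length_append]
      rw [hcntA, hcntC]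
      push_cast
      ring
    · intro x' hx' y hy
      rcases List.mem_append.mp hy with hy | hy
      · exact le_trans (hda x (by simp) y hy) (hxrest x' hx')
      · exact le_trans (of_decide_eq_true
            (List.mem_takeWhile_imp (p := fun y => decide (y ≤ x)) hy)) (hxrest x' hx')
    · intro x' hx' y hy
      rcases List.mem_append.mp hy with hy | hy
      · exact le_trans (hdc x (by simp) y hy) (hxrest x' hx')
      · exact le_trans (of_decide_eq_true
            (List.mem_takeWhile_imp (p := fun y => decide (y ≤ x)) hy)) (hxrest x' hx')

-- ===== VERDICT (by name: the statement is the Claim_ definition above) =====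
theorem triplets_fast_spec : Claim_equal_triplets_fast := by
  intro a b c _ hpre
  unfold Spec_triplets_fast triplets_fast triplets_fast_alt
  have hsA' := PySem.List.sorted_ofList_pairwise_lt a
  have hsB' := PySem.List.sorted_ofList_pairwise_lt b
  have hsC' := PySem.List.sorted_ofList_pairwise_lt c
  set SA := PySem.List.sorted (PySem.Set.ofList a) (fun x => x) false with hSA
  set SB := PySem.List.sorted (PySem.Set.ofList b) (fun x => x) false with hSB
  set SC := PySem.List.sorted (PySem.Set.ofList c) (fun x => x) false with hSC
  show (List.foldl (pvStepA SA SC) (some 0) SB.reverse).getD 0 = pvSweep SB 0 SA 0 SC 0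
  have hsA : SA.Pairwise (· ≤ ·) := hsA'.imp le_of_lt
  have hsB : SB.Pairwise (· ≤ ·) := hsB'.imp le_of_lt
  have hsC : SC.Pairwise (· ≤ ·) := hsC'.imp le_of_lt
  have hsweep := pvSweep_inv SA SC hsA hsC SB hsB [] [] SA SC 0 rfl rfl
      (by intro x _ y hy; simp at hy) (by intro x _ y hy; simp at hy)
  simp only [List.length_nil] at hsweep
  rcases hpre with hb | ⟨ha, h2⟩
  · -- b = []: no anchors on either side
    have hBnil : SB = [] := by
      rw [hSB, PySem.List.sorted_eq_nil_iff]
      simp [hb, PySem.Set.ofList]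
    rw [hBnil]
    simp [pvSweep]
  · -- a is nonempty, and either c is nonempty or no anchor reaches min(a)
    have hAne : SA ≠ [] := by
      obtain ⟨z, tl, rfl⟩ := List.exists_cons_of_ne_nil ha
      intro hnil
      rw [hSA, PySem.List.sorted_eq_nil_iff] at hnil
      have : z ∈ PySem.Set.ofList (z :: tl) := (PySem.Set.mem_ofList _ _).mpr (by simp)
      rw [hnil] at this
      simp at this
    have hmemb : ∀ x, x ∈ SB.reverse → x ∈ b := by
      intro x hx
      rw [List.mem_reverse, hSB, PySem.List.mem_sorted, PySem.Set.mem_ofList] at hx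
      exact hx
    have hc : ∀ x ∈ SB.reverse, SC ≠ [] ∨ pvCnt SA x = 0 := by
      intro x hx
      rcases h2 with hcne | hall
      · left
        obtain ⟨z, tl, rfl⟩ := List.exists_cons_of_ne_nil hcne
        intro hnil
        rw [hSC, PySem.List.sorted_eq_nil_iff] at hnil
        have : z ∈ PySem.Set.ofList (z :: tl) := (PySem.Set.mem_ofList _ _).mpr (by simp)
        rw [hnil] at this
        simp at this
      · right
        apply pvCnt_eq_zero
        intro y hy
        have hya : y ∈ a := by
          rw [hSA, PySem.List.mem_sorted, PySem.Set.mem_ofList] at hy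
          exact hy
        exact hall x (hmemb x hx) y hya
    rw [pvFoldA_eq SA SC hAne hsA hsC SB.reverse 0 hc]
    simp only [Option.getD_some, zero_add]
    rw [hsweep, zero_add]
    rw [List.map_reverse, List.sum_reverse]
    congr 1
    apply List.map_congr_left
    intro x _
    ring

theorem triplets_fast_raises : Claim_raises_triplets_fast := by
  unfold Claim_raises_triplets_fast
  constructor
  · intro a b c _ hr hp
    unfold Raises_triplets_fast at hr
    unfold Pre_triplets_fast at hp
    obtain ⟨hb, h⟩ := hr
    rcases hp with h1 | ⟨ha, h2⟩
    · exact hb h1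
    · rcases h with h | ⟨hc, x, hx, y, hy, hyx⟩
      · exact ha h
      · rcases h2 with h2 | h2
        · exact h2 hc
        · exact absurd (h2 x hx y hy) (not_lt.mpr hyx)
  · exact ⟨by decide, by decide, by decide⟩

-- self-check: the raise witness indeed lies outside Pre_ (via the first half of triplets_fast_raises)
theorem pvRaiseWitness_outside_Pre_ok : ¬ Pre_triplets_fast [] [0] [] :=
  triplets_fast_raises.1 [] [0] [] (by decide) (by decide)
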